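-- pv_equiv track=rewrite | github.com/mzgleason/linkedin_pr_agency | automation/gmail_shared.py | clean_reply_text
-- ===== SOURCE A (Python) =====
-- def clean_reply_text(text):
--     lines = text.splitlines()
--     cleaned = []
--     for line in lines:
--         if line.strip().startswith(">"):
--             continue
--         if line.strip().lower().startswith("on ") and "wrote:" in line.lower():
--             break
--         if line.strip().startswith("From:") and "@" in line:
--             break
--         cleaned.append(line)
--     return "\n".join(cleaned).strip()
-- ===== SOURCE B (Python) =====
-- from functools import reduce
--
-- def clean_reply_text(text):
--     # Right-to-left fold: a reply boundary discards everything accumulated so far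
--     # (the suffix after it); the leftmost boundary's discard happens last, so all
--     # text from the first boundary onward is dropped, modelling A's `break`.
--     def step(kept, line):
--         s = line.strip()
--         if s.startswith(">"):
--             return kept
--         if (s.lower().startswith("on ") and "wrote:" in line.lower()) or \
--            (s.startswith("From:") and "@" in line):
--             return []
--         return [line] + kept
--     body = reduce(step, reversed(text.splitlines()), [])
--     return "\n".join(body).strip()
-- ===== Notes on version B (the rewrite author's own statement) =====
-- stated objective: alternative
-- what changed: B builds the kept lines back-to-front by a right fold (reduce over the reversed lines) in which a reply-boundary line discards the whole accumulated suffix, instead of A's forward loop with continue/break.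
import Mathlib
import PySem

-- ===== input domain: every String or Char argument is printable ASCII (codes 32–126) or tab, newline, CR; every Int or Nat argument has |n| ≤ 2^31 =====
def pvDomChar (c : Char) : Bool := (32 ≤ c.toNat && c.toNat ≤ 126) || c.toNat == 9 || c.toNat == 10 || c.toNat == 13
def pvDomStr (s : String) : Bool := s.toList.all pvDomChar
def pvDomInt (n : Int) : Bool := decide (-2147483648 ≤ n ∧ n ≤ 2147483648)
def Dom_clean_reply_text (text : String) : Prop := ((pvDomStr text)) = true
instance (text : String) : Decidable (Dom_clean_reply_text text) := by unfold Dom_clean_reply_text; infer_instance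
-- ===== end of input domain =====

-- B builds the kept lines back-to-front by a right fold over the reversed lines,
-- in which a reply-boundary line discards the accumulated suffix (an alternative
-- decomposition of A's forward loop with continue/break; same cost).

-- ===== PORT A =====
-- A's for-loop with continue/break, as structural recursion over the lines.
def cleanA_go : List String → List String
  | [] => []
  | l :: rest =>
    if PySem.Str.startswith (PySem.Str.strip l) ">" then cleanA_go rest
    else if PySem.Str.startswith (PySem.Str.lower (PySem.Str.strip l)) "on "
            && PySem.Str.isIn "wrote:" (PySem.Str.lower l) then []
    else if PySem.Str.startswith (PySem.Str.strip l) "From:"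
            && PySem.Str.isIn "@" l then []
    else l :: cleanA_go rest

def clean_reply_text (text : String) : String :=
  PySem.Str.strip (PySem.Str.join "\n" (cleanA_go (PySem.Str.splitlines text)))

-- ===== PORT B =====
-- B's reducing step: quote-prefixed lines leave the accumulator alone, a
-- boundary line discards it, any other line is prepended to it.
def pvStep (kept : List String) (line : String) : List String :=
  if PySem.Str.startswith (PySem.Str.strip line) ">" then kept
  else if (PySem.Str.startswith (PySem.Str.lower (PySem.Str.strip line)) "on "
            && PySem.Str.isIn "wrote:" (PySem.Str.lower line))
          || (PySem.Str.startswith (PySem.Str.strip line) "From:"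
            && PySem.Str.isIn "@" line) then []
  else line :: kept

-- reduce(step, reversed(lines), []) = foldl over the reversed line list
def clean_reply_text_alt (text : String) : String :=
  PySem.Str.strip (PySem.Str.join "\n"
    (((PySem.Str.splitlines text).reverse).foldl pvStep []))

-- ===== PRECONDITION & SPEC =====
def Spec_clean_reply_text (text : String) (out : String) : Prop := out = clean_reply_text_alt text
instance (text : String) (out : String) : Decidable (Spec_clean_reply_text text out) := by unfold Spec_clean_reply_text; infer_instance

-- ===== CLAIM (what is proved, stated in full; the proofs are below) =====
def Claim_equal_clean_reply_text : Prop := ∀ (text : String), Dom_clean_reply_text text → Spec_clean_reply_text text (clean_reply_text text)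

-- ===== LEMMAS AND PROOFS =====

-- A's fused forward loop equals B's right fold (foldl over the reversed list).
lemma go_eq (ls : List String) :
    cleanA_go ls = ls.reverse.foldl pvStep [] := by
  rw [List.foldl_reverse]
  induction ls with
  | nil => rfl
  | cons l rest ih =>
    rw [List.foldr_cons, cleanA_go, ih, pvStep]
    by_cases h1 : PySem.Str.startswith (PySem.Str.strip l) ">" = true <;>
      simp only [h1, if_true, Bool.or_eq_true] <;> split_ifs <;> simp_all;
      (rename_i hA hB hC
       rcases hC with ⟨x, y⟩ | ⟨x, y⟩
       · exact Bool.false_ne_true ((hA x).symm.trans y)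
       · exact Bool.false_ne_true ((hB x).symm.trans y))

-- ===== VERDICT (by name: the statement is the Claim_ definition above) =====
theorem clean_reply_text_spec : Claim_equal_clean_reply_text := by
  intro text _
  unfold Spec_clean_reply_text clean_reply_text clean_reply_text_alt
  rw [go_eq]
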